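-- pv_equiv track=rewrite | github.com/SzymonIwaniuk/wdi-2024-2025 | Zestaw3/zad109.py | solve
-- ===== SOURCE A (Python) =====
-- def solve(T):
--     N = len(T)
--     maxi = 0
--
--     for i in range(N):
--         for start in range(N):
--             suma = 0
--             for length in range(10):
--                 if start + length >= N:
--                     break
--                 suma += T[i][start + length]
--                 maxi = max(maxi, suma)
--
--     for j in range(N):
--         for start in range(N):
--             suma = 0
--             for length in range(10):
--                 if start + length >= N:
--                     break
--                 suma += T[start + length][j]
--                 maxi = max(maxi, suma)
--     return maxi
-- ===== SOURCE B (Python) =====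
-- def solve(T):
--     N = len(T)
--     best = 0
--
--     def scan(line):
--         nonlocal best
--         P = [0]
--         s = 0
--         for x in line:
--             s += x
--             P.append(s)
--         for e in range(N):
--             lo = max(0, e - 9)
--             m = min(P[lo:e + 1])
--             best = max(best, P[e + 1] - m)
--
--     for i in range(N):
--         scan(T[i][:N])
--     for j in range(N):
--         scan([T[k][j] for k in range(N)])
--     return best
-- ===== Notes on version B (the rewrite author's own statement) =====
-- stated objective: faster
-- what changed: Replaces A's triple loop that re-sums every length-<=10 window from scratch by per-line prefix sums, taking for each end index the minimum prefix over the last <=10 prefix positions (windows grouped by end instead of enumerated by start and length), removing the inner re-summing loop.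
import Mathlib
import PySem

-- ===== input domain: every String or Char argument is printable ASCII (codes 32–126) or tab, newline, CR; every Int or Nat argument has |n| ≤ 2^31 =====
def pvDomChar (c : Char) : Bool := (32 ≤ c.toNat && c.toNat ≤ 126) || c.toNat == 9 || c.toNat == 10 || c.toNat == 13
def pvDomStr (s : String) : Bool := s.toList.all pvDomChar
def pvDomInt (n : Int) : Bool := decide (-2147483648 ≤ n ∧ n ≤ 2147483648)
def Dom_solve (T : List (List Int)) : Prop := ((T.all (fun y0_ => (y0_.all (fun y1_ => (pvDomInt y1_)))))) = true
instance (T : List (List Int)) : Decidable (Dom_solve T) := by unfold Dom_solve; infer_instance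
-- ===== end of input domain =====

-- B replaces A's re-summing of every window from scratch by per-line prefix sums with a
-- min over the last ≤10 prefix positions, removing the inner re-summing loop (objective: faster, measured).

-- ===== PORT A =====
-- inner 'for length in range(10)' loop with its break, state = (suma, maxi, broken);
-- f k is the element access (T[i][k] for the row pass, T[k][j] for the column pass)
def stepA (f : Nat → Int) (N start : Nat) (st : Int × Int × Bool) (length : Nat) : Int × Int × Bool :=
  match st with
  | (suma, maxi, true) => (suma, maxi, true)
  | (suma, maxi, false) =>
    if N ≤ start + length then (suma, maxi, true)
    else (suma + f (start + length), max maxi (suma + f (start + length)), false)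

def innerA (f : Nat → Int) (N start : Nat) (maxi : Int) : Int :=
  ((List.range 10).foldl (stepA f N start) ((0 : Int), maxi, false)).2.1

def solve (T : List (List Int)) : Int :=
  let N := T.length
  let maxi : Int := 0
  let maxi := (List.range N).foldl (fun maxi (i : Nat) =>
    (List.range N).foldl (fun maxi (start : Nat) =>
      innerA (fun k => PySem.List.pyGetD (PySem.List.pyGetD T (i : Int) []) (k : Int) 0) N start maxi) maxi) maxi
  let maxi := (List.range N).foldl (fun maxi (j : Nat) =>
    (List.range N).foldl (fun maxi (start : Nat) =>
      innerA (fun k => PySem.List.pyGetD (PySem.List.pyGetD T (k : Int) []) (j : Int) 0) N start maxi) maxi) maxi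
  maxi

-- ===== PORT B =====
-- P = [0]; s = 0; for x in line: s += x; P.append(s)
def prefixSums (line : List Int) : List Int :=
  (line.foldl (fun st x => (st.1 ++ [st.2 + x], st.2 + x)) (([0] : List Int), (0 : Int))).1

-- for e in range(N): lo = max(0, e-9); m = min(P[lo:e+1]); best = max(best, P[e+1]-m)
-- (min over a slice that Pre_ makes nonempty, P[e+1] in range under Pre_: .getD 0 never fires there)
def scanB (N : Nat) (line : List Int) (best : Int) : Int :=
  let P := prefixSums line
  (List.range N).foldl (fun best (e : Nat) =>
    let lo : Int := max 0 ((e : Int) - 9)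
    let m := (PySem.List.min? (PySem.List.slice P (some lo) (some ((e : Int) + 1))) (fun y => y)).getD 0
    max best (PySem.List.pyGetD P ((e : Int) + 1) 0 - m)) best

def solve_alt (T : List (List Int)) : Int :=
  let N := T.length
  let best : Int := 0
  let best := (List.range N).foldl (fun best (i : Nat) =>
    scanB N (PySem.List.slice (PySem.List.pyGetD T (i : Int) []) (some 0) (some (N : Int))) best) best
  let best := (List.range N).foldl (fun best (j : Nat) =>
    scanB N ((List.range N).map (fun (k : Nat) => PySem.List.pyGetD (PySem.List.pyGetD T (k : Int) []) (j : Int) 0)) best) best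
  best

-- ===== PRECONDITION & SPEC =====
-- A indexes T[i][k] and T[k][j] for all i,k,j < len(T): it raises IndexError exactly when
-- some row is shorter than len(T); those inputs (where B raises too) are excluded.
def Pre_solve (T : List (List Int)) : Prop := ∀ row ∈ T, T.length ≤ row.length
instance (T : List (List Int)) : Decidable (Pre_solve T) := by unfold Pre_solve; infer_instance

def pvWitness_solve : List (List Int) := [[1, -2], [3, 4]]

def Spec_solve (T : List (List Int)) (out : Int) : Prop := out = solve_alt T
instance (T : List (List Int)) (out : Int) : Decidable (Spec_solve T out) := by unfold Spec_solve; infer_instance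

-- ===== CLAIM (what is proved, stated in full; the proofs are below) =====
def Claim_equal_solve : Prop := ∀ (T : List (List Int)), Dom_solve T → Pre_solve T → Spec_solve T (solve T)

-- ===== LEMMAS AND PROOFS =====

-- sum of the first n values of f: prefix sums
def pref (f : Nat → Int) (n : Nat) : Int := ((List.range n).map f).sum

-- window [p.1, p.2] of the line f, as a difference of prefix sums
def wsum (f : Nat → Int) (p : Nat × Nat) : Int := pref f (p.2 + 1) - pref f p.1

-- the windows A enumerates, grouped by start; and the same windows grouped by end, as B visits them
def pairsA (N : Nat) : List (Nat × Nat) :=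
  (List.range N).flatMap (fun s => (List.range (min 10 (N - s))).map (fun l => (s, s + l)))
def pairsB (N : Nat) : List (Nat × Nat) :=
  (List.range N).flatMap (fun e => (List.range' (e - 9) (e + 1 - (e - 9))).map (fun a => (a, e)))

lemma pref_succ (f : Nat → Int) (n : Nat) : pref f (n + 1) = pref f n + f n := by
  simp [pref, List.range_succ]

lemma foldl_max_shift (t : List Int) (b x : Int) :
    max b (t.foldl max x) = t.foldl max (max b x) := by
  induction t generalizing x with
  | nil => rfl
  | cons y t ih => simp only [List.foldl_cons, ih, max_assoc]

lemma sub_foldl_min (c : Int) (t : List Int) (x : Int) :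
    c - t.foldl min x = (t.map (fun y => c - y)).foldl max (c - x) := by
  induction t generalizing x with
  | nil => rfl
  | cons y t ih =>
    rw [List.map_cons, List.foldl_cons, ih (min x y)]
    have h : c - min x y = max (c - x) (c - y) := by omega
    rw [h, List.foldl_cons]

lemma innerA_stall (f : Nat → Int) (N s : Nat) (l : List Nat)
    (h : ∀ k ∈ l, N ≤ s + k) : ∀ st, ((l.foldl (stepA f N s) st)).2.1 = st.2.1 := by
  induction l with
  | nil => intro st; rfl
  | cons k l ih =>
    intro st
    obtain ⟨suma, maxi, b⟩ := st
    have hk : N ≤ s + k := h k (List.mem_cons_self ..)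
    have hrest : ∀ k ∈ l, N ≤ s + k := fun k hkl => h k (List.mem_cons_of_mem _ hkl)
    cases b <;> simp only [List.foldl_cons, stepA, if_pos hk] <;> exact ih hrest _

lemma innerA_run (f : Nat → Int) (N s : Nat) :
    ∀ (c j : Nat) (acc : Int), s + j + c ≤ N →
      (List.range' j c).foldl (stepA f N s) (pref f (s + j) - pref f s, acc, false)
        = (pref f (s + j + c) - pref f s,
           ((List.range' j c).map (fun l => pref f (s + l + 1) - pref f s)).foldl max acc, false) := by
  intro c
  induction c with
  | zero => intro j acc _; simp
  | succ c ih =>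
    intro j acc h
    have hlt : ¬ N ≤ s + j := by omega
    simp only [List.range'_succ, List.foldl_cons, List.map_cons, stepA, if_neg hlt]
    have hsum : pref f (s + j) - pref f s + f (s + j) = pref f (s + j + 1) - pref f s := by
      have := pref_succ f (s + j)
      omega
    rw [hsum]
    have heq := ih (j + 1) (max acc (pref f (s + j + 1) - pref f s)) (by omega)
    rw [show s + (j + 1) = s + j + 1 from by omega] at heq
    rw [heq, show s + j + 1 + c = s + j + (c + 1) from by omega]

lemma innerA_eq (f : Nat → Int) (N s : Nat) (hs : s ≤ N) (acc : Int) :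
    innerA f N s acc
      = ((List.range (min 10 (N - s))).map (fun l => pref f (s + l + 1) - pref f s)).foldl max acc := by
  have hm : min 10 (N - s) + (10 - min 10 (N - s)) = 10 := by omega
  have hsplit : List.range 10 = List.range' 0 (min 10 (N - s)) ++ List.range' (min 10 (N - s)) (10 - min 10 (N - s)) := by
    rw [List.range_eq_range']
    rw [← hm, ← List.range'_append]
    simp
  unfold innerA
  rw [hsplit, List.foldl_append]
  have h0 : ((0 : Int), acc, false) = (pref f (s + 0) - pref f s, acc, false) := by simp
  rw [h0, innerA_run f N s (min 10 (N - s)) 0 acc (by omega)]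
  rw [innerA_stall f N s _ (by intro k hk; rw [List.mem_range'_1] at hk; omega)]
  rw [List.range_eq_range']

lemma A_pass (f : Nat → Int) (N : Nat) (acc : Int) :
    (List.range N).foldl (fun acc s => innerA f N s acc) acc
      = ((pairsA N).map (wsum f)).foldl max acc := by
  rw [pairsA, List.map_flatMap, List.foldl_flatMap]
  apply PySem.List.foldl_congr_mem
  intro acc s hs
  rw [List.mem_range] at hs
  rw [innerA_eq f N s (by omega) acc, List.map_map]
  rfl

lemma prefix_foldl (line : List Int) : ∀ (P0 : List Int) (s0 : Int),
    line.foldl (fun st x => (st.1 ++ [st.2 + x], st.2 + x)) (P0, s0)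
      = (P0 ++ (List.range line.length).map (fun i => s0 + (line.take (i + 1)).sum), s0 + line.sum) := by
  induction line with
  | nil => intro P0 s0; simp
  | cons x xs ih =>
    intro P0 s0
    simp only [List.foldl_cons, ih, List.length_cons, List.range_succ_eq_map,
      List.map_cons, List.map_map, Prod.mk.injEq]
    refine ⟨?_, by simp; ring⟩
    rw [List.append_assoc, List.singleton_append]
    congr 1
    congr 1
    · simp
    · apply List.map_congr_left
      intro a _
      simp [Function.comp]
      ring

lemma prefixSums_eq (line : List Int) :
    prefixSums line = (List.range (line.length + 1)).map (fun i => (line.take i).sum) := by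
  unfold prefixSums
  rw [prefix_foldl]
  rw [List.range_succ_eq_map]
  simp only [List.map_cons, List.map_map]
  simp [Function.comp]

lemma take_range' (s n k : Nat) : (List.range' s n).take k = List.range' s (min k n) := by
  induction n generalizing s k with
  | zero => simp
  | succ n ih =>
    cases k with
    | zero => simp
    | succ k => simp [List.range'_succ, ih, Nat.succ_min_succ]

lemma B_step (f : Nat → Int) (N e : Nat) (he : e < N) (acc : Int) :
    max acc (PySem.List.pyGetD ((List.range (N + 1)).map (pref f)) ((e : Int) + 1) 0 -
      (PySem.List.min? (PySem.List.slice ((List.range (N + 1)).map (pref f))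
        (some (max 0 ((e : Int) - 9))) (some ((e : Int) + 1))) (fun y => y)).getD 0)
      = ((List.range' (e - 9) (e + 1 - (e - 9))).map (fun a => wsum f (a, e))).foldl max acc := by
  have hlo : max 0 ((e : Int) - 9) = ((e - 9 : Nat) : Int) := by omega
  have he1 : ((e : Int) + 1) = ((e + 1 : Nat) : Int) := by omega
  rw [hlo, he1, PySem.List.slice_natCast, PySem.List.pyGetD_natCast,
    PySem.List.getD_map_range _ _ _ _ (by omega), ← List.map_drop, ← List.map_take,
    List.range_eq_range', List.drop_range', take_range']
  simp only [Nat.zero_add, Nat.mul_one]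
  have hmin : min (e + 1 - (e - 9)) (N + 1 - (e - 9)) = e + 1 - (e - 9) := by omega
  rw [hmin]
  obtain ⟨d, hd⟩ : ∃ d, e + 1 - (e - 9) = d + 1 := ⟨e - (e - 9), by omega⟩
  rw [hd, List.range'_succ, List.map_cons, PySem.List.min?_id_cons, Option.getD_some,
    List.map_cons, List.foldl_cons]
  rw [sub_foldl_min, List.map_map, foldl_max_shift]
  simp [wsum, Function.comp_def]

lemma B_line (f : Nat → Int) (N : Nat) (line : List Int)
    (hlen : line.length = N) (hf : ∀ k, k < N → line.getD k 0 = f k) (acc : Int) :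
    scanB N line acc = ((pairsB N).map (wsum f)).foldl max acc := by
  have hP : prefixSums line = (List.range (N + 1)).map (pref f) := by
    rw [prefixSums_eq, hlen]
    apply List.map_congr_left
    intro i hi
    rw [List.mem_range] at hi
    have hline : line = (List.range N).map f := by
      apply List.ext_getElem (by simpa using hlen)
      intro k h1 h2
      have hkN : k < N := by simpa [hlen] using h1
      simp only [List.getElem_map, List.getElem_range]
      rw [← hf k hkN, List.getD_eq_getElem _ _ h1]
    have hmi : min i N = i := by omega
    rw [hline, ← List.map_take, List.take_range, hmi]
    rfl
  simp only [scanB]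
  rw [hP, pairsB, List.map_flatMap, List.foldl_flatMap]
  apply PySem.List.foldl_congr_mem
  intro acc e hedge
  rw [List.mem_range] at hedge
  rw [List.map_map]
  exact B_step f N e hedge acc

lemma nodup_pairsA (N : Nat) : (pairsA N).Nodup := by
  rw [pairsA, List.nodup_flatMap]
  constructor
  · intro s _
    apply List.Nodup.map ?_ (List.nodup_range)
    intro l₁ l₂ h
    simp only [Prod.mk.injEq] at h
    omega
  · apply List.Pairwise.imp ?_ (List.pairwise_lt_range)
    intro s s' hss p hp hq
    simp only [List.mem_map, List.mem_range] at hp hq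
    obtain ⟨l, _, rfl⟩ := hp
    obtain ⟨l', _, h⟩ := hq
    have := congrArg Prod.fst h
    simp at this
    omega

lemma nodup_pairsB (N : Nat) : (pairsB N).Nodup := by
  rw [pairsB, List.nodup_flatMap]
  constructor
  · intro e _
    apply List.Nodup.map ?_ (List.nodup_range')
    intro a₁ a₂ h
    simp only [Prod.mk.injEq] at h
    exact h.1
  · apply List.Pairwise.imp ?_ (List.pairwise_lt_range)
    intro e e' hee p hp hq
    simp only [List.mem_map] at hp hq
    obtain ⟨a, _, rfl⟩ := hp
    obtain ⟨a', _, h⟩ := hq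
    have := congrArg Prod.snd h
    simp at this
    omega

lemma pairs_perm (N : Nat) : (pairsA N).Perm (pairsB N) := by
  apply List.perm_of_nodup_nodup_toFinset_eq (nodup_pairsA N) (nodup_pairsB N)
  ext p
  obtain ⟨a, e⟩ := p
  simp only [pairsA, pairsB, List.mem_toFinset, List.mem_flatMap, List.mem_range,
    List.mem_map, List.mem_range'_1, Prod.mk.injEq]
  constructor
  · rintro ⟨s, hs, l, hl, rfl, rfl⟩
    exact ⟨s + l, by omega, s, ⟨by omega, by omega⟩, rfl, rfl⟩
  · rintro ⟨e', he', a', ⟨h1, h2⟩, rfl, rfl⟩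
    exact ⟨a', by omega, e' - a', by omega, rfl, by omega⟩

lemma pass_eq (f : Nat → Int) (N : Nat) (line : List Int)
    (hlen : line.length = N) (hf : ∀ k, k < N → line.getD k 0 = f k) (acc : Int) :
    (List.range N).foldl (fun acc s => innerA f N s acc) acc = scanB N line acc := by
  rw [A_pass, B_line f N line hlen hf acc]
  exact ((pairs_perm N).map (wsum f)).foldl_eq acc

-- ===== VERDICT (by name: the statement is the Claim_ definition above) =====
theorem solve_spec : Claim_equal_solve := by
  intro T _ hpre
  show solve T = solve_alt T
  have hrowlen : ∀ i, i < T.length → T.length ≤ (T.getD i []).length := by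
    intro i hi
    rw [List.getD_eq_getElem _ _ hi]
    exact hpre _ (List.getElem_mem hi)
  have h1 : ∀ acc : Int, (List.range T.length).foldl (fun maxi (i : Nat) =>
      (List.range T.length).foldl (fun maxi (start : Nat) =>
        innerA (fun k => PySem.List.pyGetD (PySem.List.pyGetD T (i : Int) []) (k : Int) 0) T.length start maxi) maxi) acc
      = (List.range T.length).foldl (fun best (i : Nat) =>
        scanB T.length (PySem.List.slice (PySem.List.pyGetD T (i : Int) []) (some 0) (some (T.length : Int))) best) acc := by
    intro acc
    apply PySem.List.foldl_congr_mem
    intro acc i hi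
    rw [List.mem_range] at hi
    have hslice : PySem.List.slice (PySem.List.pyGetD T (i : Int) []) (some 0) (some (T.length : Int))
        = (T.getD i []).take T.length := by
      simp [PySem.List.slice_to_natCast]
    rw [hslice]
    apply pass_eq
    · rw [List.length_take]
      have := hrowlen i hi
      omega
    · intro k hk
      have hk2 : k < (T.getD i []).length := by have := hrowlen i hi; omega
      simp only [PySem.List.pyGetD_natCast]
      rw [List.getD_eq_getElem _ _ (by simpa using (by omega : k < min T.length (T.getD i []).length)),
        List.getElem_take, List.getD_eq_getElem _ _ hk2]
  have h2 : ∀ acc : Int, (List.range T.length).foldl (fun maxi (j : Nat) =>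
      (List.range T.length).foldl (fun maxi (start : Nat) =>
        innerA (fun k => PySem.List.pyGetD (PySem.List.pyGetD T (k : Int) []) (j : Int) 0) T.length start maxi) maxi) acc
      = (List.range T.length).foldl (fun best (j : Nat) =>
        scanB T.length ((List.range T.length).map (fun (k : Nat) => PySem.List.pyGetD (PySem.List.pyGetD T (k : Int) []) (j : Int) 0)) best) acc := by
    intro acc
    apply PySem.List.foldl_congr_mem
    intro acc j hj
    apply pass_eq
    · simp
    · intro k hk
      exact PySem.List.getD_map_range _ _ _ _ hk
  simp only [solve, solve_alt]
  rw [h1 0, h2 _]
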